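-- pv_equiv track=rewrite | github.com/Prashantkumariitd/quantvision-frontend | vision_service/ocr_pipeline.py | extract_symbol_and_timeframe
-- ===== SOURCE A (Python) =====
-- def extract_symbol_and_timeframe(text):
--     if not text:
--         return None, None
--
--     tokens = text.split()
--     symbol = []
--     timeframe = None
--
--     for t in tokens:
--         if any(u in t.lower() for u in ["m", "h", "d", "wk"]):
--             timeframe = t
--         else:
--             symbol.append(t)
--
--     return " ".join(symbol) if symbol else None, timeframe
-- ===== SOURCE B (Python) =====
-- def _is_tf(t):
--     return any(u in t.lower() for u in ["m", "h", "d", "wk"])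
--
--
-- def extract_symbol_and_timeframe(text):
--     if not text:
--         return None, None
--
--     tokens = text.split()
--
--     # timeframe: first matching token scanning from the right (stops early)
--     timeframe = next((t for t in reversed(tokens) if _is_tf(t)), None)
--
--     # symbol: built back-to-front by concatenation, None sentinel instead of a list
--     symbol = None
--     for t in reversed(tokens):
--         if not _is_tf(t):
--             symbol = t if symbol is None else t + " " + symbol
--
--     return symbol, timeframe
-- ===== Notes on version B (the rewrite author's own statement) =====
-- stated objective: alternative
-- what changed: Replaced A's single forward dual-accumulator loop by two reverse-order scans: timeframe is found as the first match in reversed(tokens) (an early-stopping search instead of last-overwrite), and the symbol string is assembled back-to-front by direct concatenation with a None sentinel instead of appending to a list and joining.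
import Mathlib
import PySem

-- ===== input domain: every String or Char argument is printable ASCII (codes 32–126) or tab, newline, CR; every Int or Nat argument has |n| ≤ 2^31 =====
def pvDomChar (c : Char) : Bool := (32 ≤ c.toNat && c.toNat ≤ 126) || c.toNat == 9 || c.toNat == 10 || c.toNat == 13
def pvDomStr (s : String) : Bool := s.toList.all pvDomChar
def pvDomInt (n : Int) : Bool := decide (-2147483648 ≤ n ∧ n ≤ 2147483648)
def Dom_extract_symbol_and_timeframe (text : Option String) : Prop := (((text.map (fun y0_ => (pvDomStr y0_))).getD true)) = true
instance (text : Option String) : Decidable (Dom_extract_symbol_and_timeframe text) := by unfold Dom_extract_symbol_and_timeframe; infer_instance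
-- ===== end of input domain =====

-- B replaces A's forward dual-accumulator loop by two reverse scans: a first-match
-- search for the timeframe and a back-to-front concatenation for the symbol (alternative decomposition, same cost).

-- ===== PORT A =====
def extract_symbol_and_timeframe (text : Option String) : Option String × Option String :=
  match text with
  | none => (none, none)
  | some s =>
    if s = "" then (none, none)
    else
      let tokens := PySem.Str.split₀ s
      let st := tokens.foldl
        (fun (st : List String × Option String) t =>
          if (["m", "h", "d", "wk"].any fun u => PySem.Str.isIn u (PySem.Str.lower t))
          then (st.1, some t)
          else (st.1 ++ [t], st.2))
        ([], none)
      ((if st.1 ≠ [] then some (PySem.Str.join " " st.1) else none), st.2)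

-- ===== PORT B =====
def pvIsTf (t : String) : Bool :=
  ["m", "h", "d", "wk"].any fun u => PySem.Str.isIn u (PySem.Str.lower t)

def extract_symbol_and_timeframe_alt (text : Option String) : Option String × Option String :=
  match text with
  | none => (none, none)
  | some s =>
    if s = "" then (none, none)
    else
      let tokens := PySem.Str.split₀ s
      -- next((t for t in reversed(tokens) if _is_tf(t)), None)
      let timeframe := tokens.reverse.find? pvIsTf
      -- for t in reversed(tokens): if not _is_tf(t): symbol = t if symbol is None else t + " " + symbol
      let symbol := tokens.reverse.foldl
        (fun (acc : Option String) t =>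
          if !pvIsTf t then
            some (match acc with
                  | none => t
                  | some rest => t ++ " " ++ rest)
          else acc)
        none
      (symbol, timeframe)

-- ===== PRECONDITION & SPEC =====
def Spec_extract_symbol_and_timeframe (text : Option String) (out : Option String × Option String) : Prop := out = extract_symbol_and_timeframe_alt text
instance (text : Option String) (out : Option String × Option String) : Decidable (Spec_extract_symbol_and_timeframe text out) := by unfold Spec_extract_symbol_and_timeframe; infer_instance

-- ===== CLAIM (what is proved, stated in full; the proofs are below) =====
def Claim_equal_extract_symbol_and_timeframe : Prop := ∀ (text : Option String), Dom_extract_symbol_and_timeframe text → Spec_extract_symbol_and_timeframe text (extract_symbol_and_timeframe text)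

-- ===== LEMMAS AND PROOFS =====

-- (t :: l).getLast? combined with a fallback: last of l, else t.
theorem pv_getLast?_cons_or (t : String) (l : List String) (tf : Option String) :
    ((t :: l).getLast?).or tf = (l.getLast?).or (some t) := by
  cases l with
  | nil => rfl
  | cons b bs =>
    rw [List.getLast?_cons_cons]
    cases hl : (b :: bs).getLast? with
    | none => exact absurd hl (by simp)
    | some x => rfl

-- A's loop state equals (accumulated symbols ++ filter, last timeframe match or the carried one).
theorem pv_foldl_eq (tokens : List String) (acc : List String) (tf : Option String) :
    tokens.foldl
      (fun (st : List String × Option String) t =>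
        if (["m", "h", "d", "wk"].any fun u => PySem.Str.isIn u (PySem.Str.lower t))
        then (st.1, some t)
        else (st.1 ++ [t], st.2))
      (acc, tf)
    = (acc ++ tokens.filter (fun t => !pvIsTf t),
       ((tokens.filter pvIsTf).getLast?).or tf) := by
  induction tokens generalizing acc tf with
  | nil => simp
  | cons t ts ih =>
    by_cases h : pvIsTf t = true
    · have h' : (["m", "h", "d", "wk"].any fun u => PySem.Str.isIn u (PySem.Str.lower t)) = true := h
      rw [List.foldl_cons, if_pos h', ih, List.filter_cons, List.filter_cons]
      simp [h, pv_getLast?_cons_or]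
    · have h' : (["m", "h", "d", "wk"].any fun u => PySem.Str.isIn u (PySem.Str.lower t)) = false := by
        simpa [pvIsTf] using h
      rw [List.foldl_cons, if_neg (by rw [h']; simp), ih, List.filter_cons, List.filter_cons]
      have hf : pvIsTf t = false := by simpa using h
      simp only [hf, Bool.not_false, if_true, Bool.false_eq_true, if_false]
      simp

-- first match scanning from the right = last match of the filtered list
theorem pv_find?_reverse (l : List String) :
    l.reverse.find? pvIsTf = (l.filter pvIsTf).getLast? := by
  induction l with
  | nil => rfl
  | cons t ts ih =>
    rw [List.reverse_cons, List.find?_append, ih, List.filter_cons]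
    by_cases h : pvIsTf t = true
    · have hstep := pv_getLast?_cons_or t (ts.filter pvIsTf) none
      simp only [Option.or_none] at hstep
      simp only [h, if_true]
      rw [hstep]
      simp [List.find?, h]
    · have hf : pvIsTf t = false := by simpa using h
      simp [List.find?, hf]

-- join with " " peels one token off the front when the rest is nonempty
theorem pv_join_cons (t x : String) (xs : List String) :
    PySem.Str.join " " (t :: x :: xs) = t ++ " " ++ PySem.Str.join " " (x :: xs) := by
  apply String.toList_inj.mp
  simp [PySem.Chars.join_cons_cons]

theorem pv_join_singleton (t : String) : PySem.Str.join " " [t] = t := by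
  apply String.toList_inj.mp
  simp [PySem.Chars.join_singleton]

-- B's back-to-front concatenation equals the joined filter (None iff no symbol token)
theorem pv_symbol_foldr (l : List String) :
    l.foldr
      (fun t (acc : Option String) =>
        if !pvIsTf t then
          some (match acc with
                | none => t
                | some rest => t ++ " " ++ rest)
          else acc)
      none
    = (if l.filter (fun t => !pvIsTf t) ≠ [] then
        some (PySem.Str.join " " (l.filter (fun t => !pvIsTf t))) else none) := by
  induction l with
  | nil => rfl
  | cons t ts ih =>
    rw [List.foldr_cons, ih, List.filter_cons]
    by_cases h : pvIsTf t = true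
    · simp [h]
    · have hf : pvIsTf t = false := by simpa using h
      cases hl : ts.filter (fun t => !pvIsTf t) with
      | nil => simp [hf, pv_join_singleton]
      | cons x xs => simp [hf, pv_join_cons]

-- ===== VERDICT (by name: the statement is the Claim_ definition above) =====
theorem extract_symbol_and_timeframe_spec : Claim_equal_extract_symbol_and_timeframe := by
  intro text _
  unfold Spec_extract_symbol_and_timeframe extract_symbol_and_timeframe extract_symbol_and_timeframe_alt
  cases text with
  | none => rfl
  | some s =>
    by_cases hs : s = ""
    · simp [hs]
    · simp only [if_neg hs, pv_foldl_eq]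
      rw [List.foldl_reverse, pv_symbol_foldr, pv_find?_reverse]
      simp
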